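-- pv_equiv track=rewrite | github.com/ProjectBA14/pm-internship-allocation-engine | backend/services/enhanced_internship_service.py | _same_state
-- ===== SOURCE A (Python) =====
-- def _same_state(loc1: str, loc2: str) -> bool:
--     """Check if locations are in same state"""
--     indian_states = {
--         'karnataka': ['bangalore', 'bengaluru', 'mysore'],
--         'maharashtra': ['mumbai', 'pune', 'nashik'],
--         'delhi': ['delhi', 'new delhi', 'ncr'],
--         'tamil nadu': ['chennai', 'coimbatore'],
--         'telangana': ['hyderabad', 'secunderabad']
--     }
--
--     for state, cities in indian_states.items():
--         if any(city in loc1 for city in cities) and any(city in loc2 for city in cities):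
--             return True
--     return False
-- ===== SOURCE B (Python) =====
-- _INDIAN_STATES = {
--     'karnataka': ['bangalore', 'bengaluru', 'mysore'],
--     'maharashtra': ['mumbai', 'pune', 'nashik'],
--     'delhi': ['delhi', 'new delhi', 'ncr'],
--     'tamil nadu': ['chennai', 'coimbatore'],
--     'telangana': ['hyderabad', 'secunderabad']
-- }
--
-- # Flat table of all (c1, c2) city pairs belonging to the same state,
-- # built once at import time: the state grouping disappears at query time.
-- _SAME_STATE_CITY_PAIRS = [
--     (c1, c2)
--     for cities in _INDIAN_STATES.values()
--     for c1 in cities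
--     for c2 in cities
-- ]
--
--
-- def _same_state(loc1: str, loc2: str) -> bool:
--     """Check if locations are in same state"""
--     return any(c1 in loc1 and c2 in loc2 for c1, c2 in _SAME_STATE_CITY_PAIRS)
-- ===== Notes on version B (the rewrite author's own statement) =====
-- stated objective: alternative
-- what changed: Replaced the per-state loop testing both locations against each state's city list with a precomputed flat table of same-state (city1, city2) pairs (cross product within each state) scanned once with a single any() over pairs.
import Mathlib
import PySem

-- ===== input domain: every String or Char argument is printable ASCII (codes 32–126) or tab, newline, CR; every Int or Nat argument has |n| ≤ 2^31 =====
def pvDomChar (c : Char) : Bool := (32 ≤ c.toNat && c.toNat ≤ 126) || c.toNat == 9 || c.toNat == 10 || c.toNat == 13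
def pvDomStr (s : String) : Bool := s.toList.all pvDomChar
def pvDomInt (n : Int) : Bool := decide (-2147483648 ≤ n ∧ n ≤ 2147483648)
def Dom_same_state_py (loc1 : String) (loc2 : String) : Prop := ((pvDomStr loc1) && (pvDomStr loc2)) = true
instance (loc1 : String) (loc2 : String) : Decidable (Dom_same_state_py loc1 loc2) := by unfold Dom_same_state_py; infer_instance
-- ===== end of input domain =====

-- B replaces the per-state both-locations loop by a precomputed flat table of
-- same-state city pairs scanned with a single any(); same exact result.

-- the literal dict of the Python source, as an association list
def pvIndianStates : List (String × List String) :=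
  [("karnataka", ["bangalore", "bengaluru", "mysore"]),
   ("maharashtra", ["mumbai", "pune", "nashik"]),
   ("delhi", ["delhi", "new delhi", "ncr"]),
   ("tamil nadu", ["chennai", "coimbatore"]),
   ("telangana", ["hyderabad", "secunderabad"])]

-- ===== PORT A =====
-- the for-loop over indian_states.items() with its early `return True`
def pvLoopA : List (String × List String) → String → String → Bool
  | [], _, _ => false
  | (_, cities) :: rest, l1, l2 =>
      if (cities.any fun c => PySem.Str.isIn c l1) && (cities.any fun c => PySem.Str.isIn c l2) then
        true
      else
        pvLoopA rest l1 l2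

def same_state_py (loc1 : String) (loc2 : String) : Bool :=
  pvLoopA pvIndianStates loc1 loc2

-- ===== PORT B =====
-- [(c1, c2) for cities in _INDIAN_STATES.values() for c1 in cities for c2 in cities]
def pvSameStateCityPairs : List (String × String) :=
  (pvIndianStates.map Prod.snd).flatMap fun cities =>
    cities.flatMap fun c1 => cities.map fun c2 => (c1, c2)

-- any(c1 in loc1 and c2 in loc2 for c1, c2 in _SAME_STATE_CITY_PAIRS)
def same_state_py_alt (loc1 : String) (loc2 : String) : Bool :=
  pvSameStateCityPairs.any fun p => PySem.Str.isIn p.1 loc1 && PySem.Str.isIn p.2 loc2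

-- ===== PRECONDITION & SPEC =====
def Spec_same_state_py (loc1 : String) (loc2 : String) (out : Bool) : Prop := out = same_state_py_alt loc1 loc2
instance (loc1 : String) (loc2 : String) (out : Bool) : Decidable (Spec_same_state_py loc1 loc2 out) := by unfold Spec_same_state_py; infer_instance

-- ===== CLAIM (what is proved, stated in full; the proofs are below) =====
def Claim_equal_same_state_py : Prop := ∀ (loc1 : String) (loc2 : String), Dom_same_state_py loc1 loc2 → Spec_same_state_py loc1 loc2 (same_state_py loc1 loc2)

-- ===== LEMMAS AND PROOFS =====

-- A's loop returns true iff some entry matches both locations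
theorem pvLoopA_eq_true_iff (items : List (String × List String)) (l1 l2 : String) :
    pvLoopA items l1 l2 = true ↔
      ∃ p ∈ items, ((p.2.any fun c => PySem.Str.isIn c l1) &&
                    (p.2.any fun c => PySem.Str.isIn c l2)) = true := by
  induction items with
  | nil => simp [pvLoopA]
  | cons hd tl ih =>
    obtain ⟨s, cities⟩ := hd
    simp only [pvLoopA]
    split_ifs with h
    · simp only [true_iff]
      exact ⟨(s, cities), List.mem_cons_self, h⟩
    · rw [ih]
      constructor
      · rintro ⟨p, hp, hc⟩
        exact ⟨p, List.mem_cons_of_mem _ hp, hc⟩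
      · rintro ⟨p, hp, hc⟩
        rcases List.mem_cons.mp hp with rfl | hp'
        · exact absurd hc h
        · exact ⟨p, hp', hc⟩

-- B's pair scan returns true iff some entry matches both locations
theorem alt_eq_true_iff (l1 l2 : String) :
    same_state_py_alt l1 l2 = true ↔
      ∃ p ∈ pvIndianStates, ((p.2.any fun c => PySem.Str.isIn c l1) &&
                             (p.2.any fun c => PySem.Str.isIn c l2)) = true := by
  unfold same_state_py_alt pvSameStateCityPairs
  simp only [List.any_eq_true, List.mem_flatMap, List.mem_map, Bool.and_eq_true]
  constructor
  · rintro ⟨q, ⟨cities, ⟨p, hp, rfl⟩, c1, hc1, c2, hc2, rfl⟩, h1, h2⟩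
    exact ⟨p, hp, ⟨⟨c1, hc1, h1⟩, ⟨c2, hc2, h2⟩⟩⟩
  · rintro ⟨p, hp, ⟨c1, hc1, h1⟩, ⟨c2, hc2, h2⟩⟩
    exact ⟨(c1, c2), ⟨p.2, ⟨p, hp, rfl⟩, ⟨c1, hc1, ⟨c2, hc2, rfl⟩⟩⟩, h1, h2⟩

-- ===== VERDICT (by name: the statement is the Claim_ definition above) =====
theorem same_state_py_spec : Claim_equal_same_state_py := by
  intro l1 l2 _
  unfold Spec_same_state_py same_state_py
  exact Bool.coe_iff_coe.mp ((pvLoopA_eq_true_iff pvIndianStates l1 l2).trans (alt_eq_true_iff l1 l2).symm)
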